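-- pv_equiv track=rewrite | github.com/NVlabs/parrot | docs/scripts/generate_comparisons.py | strip_license_header
-- ===== SOURCE A (Python) =====
-- def strip_license_header(code):
--     """
--     Strip SPDX license header and GitHub URL comments from code.
--     Removes the block comment at the start of the file and any GitHub URL comments.
--     """
--     if not code:
--         return code
--
--     lines = code.split('\n')
--     result_lines = []
--     in_license_block = False
--     found_first_code = False
--
--     for i, line in enumerate(lines):
--         stripped = line.strip()
--
--         # Check if we're entering a license block comment
--         if not found_first_code and stripped.startswith('/*'):
--             in_license_block = True
--             continue
--
--         # Check if we're exiting a license block comment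
--         if in_license_block and '*/' in line:
--             in_license_block = False
--             continue
--
--         # Skip lines inside license block
--         if in_license_block:
--             continue
--
--         # Skip GitHub URL comments (after license block)
--         if not found_first_code and stripped.startswith('//'):
--             # Check if it's a GitHub URL or "to" line
--             if 'github.com' in stripped or stripped.startswith('// to'):
--                 continue
--
--         # Skip empty lines at the beginning
--         if not found_first_code and not stripped:
--             continue
--
--         # We've found the first line of actual code
--         found_first_code = True
--         result_lines.append(line)
--
--     return '\n'.join(result_lines)
-- ===== SOURCE B (Python) =====
-- def strip_license_header(code):
--     """
--     Strip SPDX license header and GitHub URL comments from code.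
--
--     Finds the index of the first real code line (same skip rules as the
--     original: leading /* block, */ exit, GitHub//'// to' URL comments,
--     blank lines) and returns the verbatim suffix of lines from there.
--     """
--     if not code:
--         return code
--
--     lines = code.split('\n')
--     in_license_block = False
--     start = len(lines)
--     i = 0
--     while i < len(lines):
--         stripped = lines[i].strip()
--         if stripped.startswith('/*'):
--             in_license_block = True
--         elif in_license_block:
--             if '*/' in lines[i]:
--                 in_license_block = False
--         elif stripped.startswith('//') and ('github.com' in stripped or stripped.startswith('// to')):
--             pass
--         elif not stripped:
--             pass
--         else:
--             start = i
--             break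
--         i += 1
--
--     return '\n'.join(lines[start:])
-- ===== Notes on version B (the rewrite author's own statement) =====
-- stated objective: simpler
-- what changed: B replaces A's line-by-line accumulation of result_lines with boundary detection: it scans for the index of the first real code line (same skip rules) and returns the verbatim suffix lines[start:], exploiting the fact that once code is found every remaining line is kept.
import Mathlib
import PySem

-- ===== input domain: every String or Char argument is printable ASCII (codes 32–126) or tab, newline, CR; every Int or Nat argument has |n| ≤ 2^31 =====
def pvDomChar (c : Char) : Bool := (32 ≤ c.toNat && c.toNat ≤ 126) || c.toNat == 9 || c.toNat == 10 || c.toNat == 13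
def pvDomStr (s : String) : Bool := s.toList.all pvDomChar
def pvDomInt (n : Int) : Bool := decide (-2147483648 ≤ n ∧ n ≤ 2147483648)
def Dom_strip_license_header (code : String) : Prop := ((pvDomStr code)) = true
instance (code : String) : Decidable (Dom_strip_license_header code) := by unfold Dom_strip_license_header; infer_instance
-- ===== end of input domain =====

-- B replaces A's line-by-line accumulation with boundary detection: it finds the
-- index of the first real code line and returns the verbatim suffix (simpler).

-- ===== PORT A =====
-- A's for-loop over lines with state (in_license_block, found_first_code, result_lines)
def pvALoop : List String → Bool → Bool → List String → List String
  | [], _, _, res => res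
  | l :: ls, inb, found, res =>
    let stripped := PySem.Str.strip l
    if !found && PySem.Str.startswith stripped "/*" then
      pvALoop ls true found res
    else if inb && PySem.Str.isIn "*/" l then
      pvALoop ls false found res
    else if inb then
      pvALoop ls inb found res
    else if !found && PySem.Str.startswith stripped "//" &&
            (PySem.Str.isIn "github.com" stripped || PySem.Str.startswith stripped "// to") then
      pvALoop ls inb found res
    else if !found && stripped = "" then
      pvALoop ls inb found res
    else
      pvALoop ls inb true (res ++ [l])

def strip_license_header (code : String) : String :=
  if code = "" then code
  else PySem.Str.join "\n" (pvALoop ((PySem.Str.split? code "\n").getD []) false false [])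

-- ===== PORT B =====
-- B's while-loop: advance index i with the same skip rules, return the index of
-- the first surviving line (len(lines) if none survives)
def pvBFind (lines : List String) (inb : Bool) (i : Nat) : Nat :=
  if h : i < lines.length then
    let line := lines[i]
    let stripped := PySem.Str.strip line
    if PySem.Str.startswith stripped "/*" then
      pvBFind lines true (i + 1)
    else if inb then
      if PySem.Str.isIn "*/" line then pvBFind lines false (i + 1)
      else pvBFind lines true (i + 1)
    else if PySem.Str.startswith stripped "//" &&
            (PySem.Str.isIn "github.com" stripped || PySem.Str.startswith stripped "// to") then
      pvBFind lines inb (i + 1)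
    else if stripped = "" then
      pvBFind lines inb (i + 1)
    else i
  else lines.length
termination_by lines.length - i

def strip_license_header_alt (code : String) : String :=
  if code = "" then code
  else
    let lines := (PySem.Str.split? code "\n").getD []
    PySem.Str.join "\n" (lines.drop (pvBFind lines false 0))

-- ===== PRECONDITION & SPEC =====
def Spec_strip_license_header (code : String) (out : String) : Prop := out = strip_license_header_alt code
instance (code : String) (out : String) : Decidable (Spec_strip_license_header code out) := by unfold Spec_strip_license_header; infer_instance

-- ===== CLAIM (what is proved, stated in full; the proofs are below) =====
def Claim_equal_strip_license_header : Prop := ∀ (code : String), Dom_strip_license_header code → Spec_strip_license_header code (strip_license_header code)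

-- ===== LEMMAS AND PROOFS =====

-- once the first code line is found (and the block flag is off), A keeps every line
theorem pvALoop_found (ls : List String) (res : List String) :
    pvALoop ls false true res = res ++ ls := by
  induction ls generalizing res with
  | nil => simp [pvALoop]
  | cons l ls ih => simp [pvALoop, ih]

-- the invariant tying A's accumulation to B's boundary index
theorem pvALoop_eq_drop (lines : List String) (i : Nat) (inb : Bool) (res : List String)
    (hi : i ≤ lines.length) :
    pvALoop (lines.drop i) inb false res = res ++ lines.drop (pvBFind lines inb i) := by
  by_cases h : i < lines.length
  · have hdrop : lines.drop i = lines[i] :: lines.drop (i + 1) :=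
      List.drop_eq_getElem_cons h
    rw [hdrop]
    unfold pvBFind
    rw [dif_pos h]
    simp only [pvALoop, Bool.not_false, Bool.true_and]
    by_cases h1 : PySem.Str.startswith (PySem.Str.strip lines[i]) "/*" = true
    · rw [if_pos h1, if_pos h1]
      exact pvALoop_eq_drop lines (i + 1) true res (by omega)
    · rw [if_neg h1, if_neg h1]
      cases hb : inb with
      | true =>
        by_cases h2 : PySem.Str.isIn "*/" lines[i] = true
        · simp only [h2, Bool.true_and, reduceIte]
          exact pvALoop_eq_drop lines (i + 1) false res (by omega)
        · simp only [Bool.true_and, eq_false_of_ne_true h2, Bool.false_eq_true, reduceIte]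
          exact pvALoop_eq_drop lines (i + 1) true res (by omega)
      | false =>
        rw [if_neg (by simp), if_neg (by simp)]
        by_cases h3 : (PySem.Str.startswith (PySem.Str.strip lines[i]) "//" &&
            (PySem.Str.isIn "github.com" (PySem.Str.strip lines[i]) ||
             PySem.Str.startswith (PySem.Str.strip lines[i]) "// to")) = true
        · rw [if_pos h3, if_pos h3]
          exact pvALoop_eq_drop lines (i + 1) false res (by omega)
        · rw [if_neg h3, if_neg h3]
          by_cases h4 : PySem.Str.strip lines[i] = ""
          · rw [if_pos (by simp [h4]), if_pos h4]
            exact pvALoop_eq_drop lines (i + 1) false res (by omega)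
          · rw [if_neg (by simp [h4]), if_neg h4]
            rw [pvALoop_found, List.append_assoc]
            congr 1
            exact (List.singleton_append ▸ (List.drop_eq_getElem_cons h).symm)
  · have hie : i = lines.length := by omega
    subst hie
    unfold pvBFind
    rw [dif_neg h]
    simp [pvALoop]
termination_by lines.length - i

-- ===== VERDICT (by name: the statement is the Claim_ definition above) =====
theorem strip_license_header_spec : Claim_equal_strip_license_header := by
  intro code _
  unfold Spec_strip_license_header strip_license_header strip_license_header_alt
  by_cases hc : code = ""
  · simp [hc]
  · rw [if_neg hc, if_neg hc]
    have := pvALoop_eq_drop ((PySem.Str.split? code "\n").getD []) 0 false [] (Nat.zero_le _)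
    simp only [List.drop_zero, List.nil_append] at this
    rw [this]
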